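-- pv_equiv track=rewrite | github.com/jesvarzam/lookus | core/utils.py | detectPorts
-- ===== SOURCE A (Python) =====
-- PRINTER_PORTS = [80, 443, 161, 631, 2501, 5001, 6310, 9100, 9101, 9102, 9600]
--
-- WEB_SERVER_PORTS = [22, 80, 443, 8080]
--
-- ROUTER_PORTS = [53, 80, 443]
--
-- def detectPorts(total_open_ports):
--
--     possible_devices = {'Personal web server': 0, 'Router': 0, 'Printer': 0}
--
--     for port in total_open_ports:
--         if port in WEB_SERVER_PORTS:
--             possible_devices['Personal web server'] += 1
--         if port in ROUTER_PORTS: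
--             possible_devices['Router'] += 1
--         if port in PRINTER_PORTS:
--             possible_devices['Printer'] += 1
--
--     return possible_devices
-- ===== SOURCE B (Python) =====
-- WEB_SERVER_PORTS = [22, 80, 443, 8080]
-- ROUTER_PORTS = [53, 80, 443]
-- PRINTER_PORTS = [80, 443, 161, 631, 2501, 5001, 6310, 9100, 9101, 9102, 9600]
--
-- def detectPorts(total_open_ports):
--     freq = {}
--     for port in total_open_ports:
--         freq[port] = freq.get(port, 0) + 1
--     return {
--         'Personal web server': sum(freq.get(p, 0) for p in WEB_SERVER_PORTS),
--         'Router': sum(freq.get(p, 0) for p in ROUTER_PORTS),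
--         'Printer': sum(freq.get(p, 0) for p in PRINTER_PORTS),
--     }
-- ===== Notes on version B (the rewrite author's own statement) =====
-- stated objective: alternative
-- what changed: B builds a frequency table of the open ports in one pass, then derives each device-type count by summing the table's entries over that type's fixed port list, reversing A's traversal (A scans the input and runs three membership tests per port).
import Mathlib
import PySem

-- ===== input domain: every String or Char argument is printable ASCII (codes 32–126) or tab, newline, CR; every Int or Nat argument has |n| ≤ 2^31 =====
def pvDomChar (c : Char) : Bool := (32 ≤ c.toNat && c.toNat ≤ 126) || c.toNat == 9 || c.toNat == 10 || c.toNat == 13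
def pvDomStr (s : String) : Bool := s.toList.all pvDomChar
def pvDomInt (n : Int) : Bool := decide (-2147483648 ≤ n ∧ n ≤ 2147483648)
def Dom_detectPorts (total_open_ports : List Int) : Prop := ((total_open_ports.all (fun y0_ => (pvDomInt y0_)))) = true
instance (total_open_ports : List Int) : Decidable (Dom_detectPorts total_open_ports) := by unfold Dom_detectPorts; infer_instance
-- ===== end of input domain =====

-- B replaces A's scan-with-three-membership-tests by a one-pass frequency table
-- plus sums of its entries over the three fixed port lists (alternative traversal).

-- module-level constants shared by both programs
def PRINTER_PORTS : List Int := [80, 443, 161, 631, 2501, 5001, 6310, 9100, 9101, 9102, 9600]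
def WEB_SERVER_PORTS : List Int := [22, 80, 443, 8080]
def ROUTER_PORTS : List Int := [53, 80, 443]

-- ===== PORT A =====
def detectPorts (total_open_ports : List Int) : List (String × Int) :=
  let possible_devices : PySem.Dict String Int :=
    PySem.Dict.ofList [("Personal web server", 0), ("Router", 0), ("Printer", 0)]
  let possible_devices := total_open_ports.foldl (fun d port =>
    let d := if WEB_SERVER_PORTS.contains port then d.modify "Personal web server" 0 (· + 1) else d
    let d := if ROUTER_PORTS.contains port then d.modify "Router" 0 (· + 1) else d
    let d := if PRINTER_PORTS.contains port then d.modify "Printer" 0 (· + 1) else d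
    d) possible_devices
  possible_devices.items

-- ===== PORT B =====
def detectPorts_alt (total_open_ports : List Int) : List (String × Int) :=
  let freq : PySem.Dict Int Int :=
    total_open_ports.foldl (fun d port => d.insert port (d.getD port 0 + 1)) PySem.Dict.empty
  [("Personal web server", (WEB_SERVER_PORTS.map (fun p => freq.getD p 0)).sum),
   ("Router", (ROUTER_PORTS.map (fun p => freq.getD p 0)).sum),
   ("Printer", (PRINTER_PORTS.map (fun p => freq.getD p 0)).sum)]

-- ===== PRECONDITION & SPEC =====
def Spec_detectPorts (total_open_ports : List Int) (out : List (String × Int)) : Prop := out = detectPorts_alt total_open_ports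
instance (total_open_ports : List Int) (out : List (String × Int)) : Decidable (Spec_detectPorts total_open_ports out) := by unfold Spec_detectPorts; infer_instance

-- ===== CLAIM (what is proved, stated in full; the proofs are below) =====
def Claim_equal_detectPorts : Prop := ∀ (total_open_ports : List Int), Dom_detectPorts total_open_ports → Spec_detectPorts total_open_ports (detectPorts total_open_ports)

-- ===== LEMMAS AND PROOFS =====

-- A's loop step
def pvStepA (d : PySem.Dict String Int) (port : Int) : PySem.Dict String Int :=
  let d := if WEB_SERVER_PORTS.contains port then d.modify "Personal web server" 0 (· + 1) else d
  let d := if ROUTER_PORTS.contains port then d.modify "Router" 0 (· + 1) else d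
  let d := if PRINTER_PORTS.contains port then d.modify "Printer" 0 (· + 1) else d
  d

-- sum of a 0/1 indicator over a duplicate-free list is a membership test
theorem pvIndSum (W : List Int) (x : Int) (hW : W.Nodup) :
    (W.map (fun p => if p = x then (1:Int) else 0)).sum
      = if W.contains x then (1:Int) else 0 := by
  induction W with
  | nil => simp
  | cons w W ihW =>
    have hw : w ∉ W := (List.nodup_cons.mp hW).1
    have hW' : W.Nodup := (List.nodup_cons.mp hW).2
    by_cases hwx : w = x
    · subst hwx
      have hz : (W.map (fun p => if p = w then (1:Int) else 0)).sum = 0 := by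
        apply List.sum_eq_zero; intro y hy
        simp only [List.mem_map] at hy
        obtain ⟨p, hp, rfl⟩ := hy
        by_cases h : p = w
        · exact absurd (h ▸ hp) hw
        · exact if_neg h
      simp [hz]
    · have hxw : ¬ x = w := fun h => hwx h.symm
      simp only [List.map_cons, List.sum_cons, if_neg hwx, ihW hW', zero_add]
      by_cases hx : x ∈ W <;> simp [hx, hxw]

-- B's sums equal counts of ports lying in the respective fixed list
theorem pvSumCounts (W xs : List Int) (hW : W.Nodup) :
    (W.map (fun p => (xs.count p : Int))).sum
      = (xs.countP (fun x => W.contains x) : Int) := by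
  induction xs with
  | nil => simp
  | cons x xs ih =>
    have hc : ∀ p : Int, ((x :: xs).count p : Int) = (xs.count p : Int) + (if p = x then 1 else 0) := by
      intro p
      rw [List.count_cons]
      by_cases h : p = x
      · subst h; simp
      · simp [h, Ne.symm h]
    rw [List.map_congr_left (fun p _ => hc p), List.sum_map_add, ih, pvIndSum W x hW,
        List.countP_cons]
    by_cases hx : W.contains x <;> simp [hx]

-- one step of A's loop on the three-key dict
theorem pvStepEq (x a b c : Int) :
    pvStepA (PySem.Dict.ofList [("Personal web server", a), ("Router", b), ("Printer", c)]) x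
      = PySem.Dict.ofList
          [("Personal web server", a + (if WEB_SERVER_PORTS.contains x then (1:Int) else 0)),
           ("Router", b + (if ROUTER_PORTS.contains x then (1:Int) else 0)),
           ("Printer", c + (if PRINTER_PORTS.contains x then (1:Int) else 0))] := by
  by_cases h1 : x ∈ WEB_SERVER_PORTS <;>
    by_cases h2 : x ∈ ROUTER_PORTS <;>
      by_cases h3 : x ∈ PRINTER_PORTS <;>
        simp [pvStepA, h1, h2, h3, PySem.Dict.ofList, PySem.Dict.modify, PySem.Dict.update,
              PySem.Dict.empty, PySem.Dict.insert, PySem.Dict.contains, PySem.Dict.getD,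
              PySem.Dict.get?]

-- A's accumulated dict, characterised
theorem pvFoldA (xs : List Int) (a b c : Int) :
    xs.foldl pvStepA (PySem.Dict.ofList [("Personal web server", a), ("Router", b), ("Printer", c)])
      = PySem.Dict.ofList
          [("Personal web server", a + (xs.countP (fun x => WEB_SERVER_PORTS.contains x) : Int)),
           ("Router", b + (xs.countP (fun x => ROUTER_PORTS.contains x) : Int)),
           ("Printer", c + (xs.countP (fun x => PRINTER_PORTS.contains x) : Int))] := by
  induction xs generalizing a b c with
  | nil => simp
  | cons x xs ih =>
    rw [List.foldl_cons, pvStepEq, ih]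
    have hcnt : ∀ (L : List Int), ((x :: xs).countP (fun y => L.contains y) : Int)
        = (if L.contains x then (1:Int) else 0) + (xs.countP (fun y => L.contains y) : Int) := by
      intro L
      rw [List.countP_cons]
      by_cases h : L.contains x <;> simp <;> ring
    rw [hcnt WEB_SERVER_PORTS, hcnt ROUTER_PORTS, hcnt PRINTER_PORTS]
    simp [add_assoc]

theorem pvFreqGetD (xs : List Int) (p : Int) :
    (xs.foldl (fun d port => d.insert port (d.getD port 0 + 1)) (PySem.Dict.empty)).getD p 0
      = (xs.count p : Int) := by
  rw [PySem.Dict.getD_foldl_insert_add_one]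
  simp

theorem pvAeq (xs : List Int) :
    detectPorts xs
      = [("Personal web server", (xs.countP (fun x => WEB_SERVER_PORTS.contains x) : Int)),
         ("Router", (xs.countP (fun x => ROUTER_PORTS.contains x) : Int)),
         ("Printer", (xs.countP (fun x => PRINTER_PORTS.contains x) : Int))] := by
  show (xs.foldl pvStepA (PySem.Dict.ofList
      [("Personal web server", 0), ("Router", 0), ("Printer", 0)])).items = _
  rw [pvFoldA]
  simp [PySem.Dict.ofList, PySem.Dict.update, PySem.Dict.empty, PySem.Dict.insert,
        PySem.Dict.contains]

theorem pvBeq (xs : List Int) :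
    detectPorts_alt xs
      = [("Personal web server", (xs.countP (fun x => WEB_SERVER_PORTS.contains x) : Int)),
         ("Router", (xs.countP (fun x => ROUTER_PORTS.contains x) : Int)),
         ("Printer", (xs.countP (fun x => PRINTER_PORTS.contains x) : Int))] := by
  simp only [detectPorts_alt, pvFreqGetD]
  rw [pvSumCounts WEB_SERVER_PORTS xs (by decide), pvSumCounts ROUTER_PORTS xs (by decide),
      pvSumCounts PRINTER_PORTS xs (by decide)]

-- ===== VERDICT (by name: the statement is the Claim_ definition above) =====
theorem detectPorts_spec : Claim_equal_detectPorts := by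
  intro xs _
  unfold Spec_detectPorts
  rw [pvAeq, pvBeq]
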